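-- pv_equiv track=rewrite | github.com/kcwilliams3/TwilightImperiumOnline | Tools/processsystemdata.py | getSpaceBeforeCol
-- ===== SOURCE A (Python) =====
-- import math
--
-- tabSize = 4
--
-- def getTabLevel(occupied):
-- 	#returns the current indentation level
-- 	return math.floor(occupied / tabSize)
--
-- def getSpaceBeforeCol(col,preString,race,file):
-- 	#Args:
-- 	# col:			the column we want the resulting space to get to
-- 	# preString:	the  string of "occupied" space before current checking point
-- 	initialTabLevel = getTabLevel(len(preString.expandtabs(tabSize)))
-- 	space = ""
-- 	tabLevel = initialTabLevel
-- 	while tabLevel <= col: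
-- 		tabLevel += 1
-- 		space += '\t'
-- 	return space
-- ===== SOURCE B (Python) =====
-- import math
--
-- tabSize = 4
--
-- def getTabLevel(occupied):
--     # returns the current indentation level
--     return math.floor(occupied / tabSize)
--
-- def getSpaceBeforeCol(col, preString, race, file):
--     # closed form: one tab per level from initialTabLevel up to col, inclusive
--     initialTabLevel = getTabLevel(len(preString.expandtabs(tabSize)))
--     return '\t' * max(0, col - initialTabLevel + 1)
-- ===== Notes on version B (the rewrite author's own statement) =====
-- stated objective: simpler
-- what changed: Replaced the while-loop that appends one tab per level with a single closed-form string multiplication '\t' * max(0, col - initialTabLevel + 1).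
import Mathlib
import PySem

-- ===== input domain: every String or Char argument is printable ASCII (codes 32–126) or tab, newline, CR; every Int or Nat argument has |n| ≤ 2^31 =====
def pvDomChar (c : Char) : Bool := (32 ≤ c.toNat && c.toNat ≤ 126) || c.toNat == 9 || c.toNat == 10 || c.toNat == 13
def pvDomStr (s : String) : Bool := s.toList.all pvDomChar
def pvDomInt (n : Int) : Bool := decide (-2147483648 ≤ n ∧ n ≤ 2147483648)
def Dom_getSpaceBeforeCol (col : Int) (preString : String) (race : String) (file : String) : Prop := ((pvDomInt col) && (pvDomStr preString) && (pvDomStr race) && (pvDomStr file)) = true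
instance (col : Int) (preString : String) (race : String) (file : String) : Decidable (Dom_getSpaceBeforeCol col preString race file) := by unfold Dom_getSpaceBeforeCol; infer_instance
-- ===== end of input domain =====

-- B replaces A's tab-appending while-loop by the closed form '\t' * max(0, col - initialTabLevel + 1) (objective: simpler).

-- ===== PORT A =====
-- hand port of str.expandtabs(4) restricted to its LENGTH (exact for tabsize 4:
-- '\t' pads to the next multiple of 4 of the current column, '\n'/'\r' reset the column,
-- every other char advances the column by one); shared by both ports, as both Pythons
-- call the same builtin.
def pvExpandTabsLen : List Char → Nat → Nat
  | [], _ => 0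
  | c :: rest, colPos =>
    if c = '\t' then
      let pad := 4 - colPos % 4
      pad + pvExpandTabsLen rest (colPos + pad)
    else if c = '\n' ∨ c = '\r' then
      1 + pvExpandTabsLen rest 0
    else
      1 + pvExpandTabsLen rest (colPos + 1)

-- math.floor(occupied / 4) == occupied // 4 exactly for |occupied| ≤ 2^31
def getTabLevel (occupied : Int) : Int := PySem.Int.floordiv occupied 4

-- the while-loop of A, step for step
def getSpaceBeforeColLoop (col : Int) (tabLevel : Int) (space : String) : String :=
  if tabLevel ≤ col then
    getSpaceBeforeColLoop col (tabLevel + 1) (space ++ "\t")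
  else
    space
  termination_by (col + 1 - tabLevel).toNat
  decreasing_by omega

def getSpaceBeforeCol (col : Int) (preString : String) (race : String) (file : String) : String :=
  let initialTabLevel := getTabLevel (Int.ofNat (pvExpandTabsLen preString.toList 0))
  getSpaceBeforeColLoop col initialTabLevel ""

-- ===== PORT B =====
def getSpaceBeforeCol_alt (col : Int) (preString : String) (race : String) (file : String) : String :=
  let initialTabLevel := getTabLevel (Int.ofNat (pvExpandTabsLen preString.toList 0))
  String.ofList (List.replicate (max 0 (col - initialTabLevel + 1)).toNat '\t')

-- ===== PRECONDITION & SPEC =====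
def Spec_getSpaceBeforeCol (col : Int) (preString : String) (race : String) (file : String) (out : String) : Prop := out = getSpaceBeforeCol_alt col preString race file
instance (col : Int) (preString : String) (race : String) (file : String) (out : String) : Decidable (Spec_getSpaceBeforeCol col preString race file out) := by unfold Spec_getSpaceBeforeCol; infer_instance

-- ===== CLAIM (what is proved, stated in full; the proofs are below) =====
def Claim_equal_getSpaceBeforeCol : Prop := ∀ (col : Int) (preString : String) (race : String) (file : String), Dom_getSpaceBeforeCol col preString race file → Spec_getSpaceBeforeCol col preString race file (getSpaceBeforeCol col preString race file)

-- ===== LEMMAS AND PROOFS =====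
theorem getSpaceBeforeColLoop_eq (col : Int) : ∀ (t : Int) (s : String),
    getSpaceBeforeColLoop col t s = s ++ String.ofList (List.replicate (col + 1 - t).toNat '\t') := by
  intro t
  have h : ∀ (n : Nat) (t : Int), (col + 1 - t).toNat = n → ∀ (s : String),
      getSpaceBeforeColLoop col t s = s ++ String.ofList (List.replicate (col + 1 - t).toNat '\t') := by
    intro n
    induction n with
    | zero =>
      intro t ht s
      rw [getSpaceBeforeColLoop]
      have : ¬ t ≤ col := by omega
      simp [this, ht]
    | succ k ih =>
      intro t ht s
      rw [getSpaceBeforeColLoop]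
      have hle : t ≤ col := by omega
      have ht' : (col + 1 - (t + 1)).toNat = k := by omega
      simp only [hle, if_true]
      rw [ih (t + 1) ht' (s ++ "\t")]
      have hrep : (col + 1 - t).toNat = (col + 1 - (t + 1)).toNat + 1 := by omega
      rw [hrep, List.replicate_succ]
      apply String.ext
      simp
  exact h (col + 1 - t).toNat t rfl

-- ===== VERDICT (by name: the statement is the Claim_ definition above) =====
theorem getSpaceBeforeCol_spec : Claim_equal_getSpaceBeforeCol := by
  unfold Claim_equal_getSpaceBeforeCol
  intro col preString race file _
  unfold Spec_getSpaceBeforeCol getSpaceBeforeCol getSpaceBeforeCol_alt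
  rw [getSpaceBeforeColLoop_eq]
  have h : (col + 1 - getTabLevel (Int.ofNat (pvExpandTabsLen preString.toList 0))).toNat
      = (max 0 (col - getTabLevel (Int.ofNat (pvExpandTabsLen preString.toList 0)) + 1)).toNat := by
    omega
  rw [h]
  apply String.ext
  simp
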